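-- pv_equiv track=rewrite | github.com/asweigart/programmedpatterns | book/visualpatterns.py | formula62
-- ===== SOURCE A (Python) =====
-- def formula62(step):
--     width = 1
--     height = 1
--     for i in range(2, step + 1):
--         if i % 2 == 0:
--             width += 2
--             height += 2
--         else:
--             height -= 1
--     return width * height
-- ===== SOURCE B (Python) =====
-- def formula62(step):
--     # Closed form: the loop adds 2 to width/height per even i in [2,step] and
--     # subtracts 1 from height per odd i in [2,step].
--     if step < 2:
--         return 1
--     evens = step // 2            # count of even i in 2..step
--     odds = (step - 1) // 2       # count of odd i in 2..step
--     return (1 + 2 * evens) * (1 + 2 * evens - odds)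
-- ===== Notes on version B (the rewrite author's own statement) =====
-- stated objective: faster
-- what changed: Replaced the O(step) loop over range(2, step+1) with an O(1) closed form using the counts of even and odd indices in that range.
import Mathlib
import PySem

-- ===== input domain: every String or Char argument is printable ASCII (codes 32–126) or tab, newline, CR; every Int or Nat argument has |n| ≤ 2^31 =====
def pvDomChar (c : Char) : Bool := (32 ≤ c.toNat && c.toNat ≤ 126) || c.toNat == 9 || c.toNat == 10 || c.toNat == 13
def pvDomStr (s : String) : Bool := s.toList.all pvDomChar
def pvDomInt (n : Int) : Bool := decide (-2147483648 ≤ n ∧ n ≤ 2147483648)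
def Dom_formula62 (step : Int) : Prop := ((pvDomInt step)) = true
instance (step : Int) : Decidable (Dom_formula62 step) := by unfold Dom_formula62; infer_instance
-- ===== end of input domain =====

-- B replaces the O(step) loop over range(2, step+1) by an O(1) closed form counting its even/odd indices.

-- ===== PORT A =====
-- the for-loop of A over range(2, step+1), carried as the state (width, height)
def pvLoopA (step : Int) : Int × Int :=
  (PySem.List.pyRange 2 (step + 1) 1).foldl
    (fun (p : Int × Int) i =>
      if PySem.Int.mod i 2 == 0 then (p.1 + 2, p.2 + 2) else (p.1, p.2 - 1))
    (1, 1)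

def formula62 (step : Int) : Int := (pvLoopA step).1 * (pvLoopA step).2

-- ===== PORT B =====
def formula62_alt (step : Int) : Int :=
  if step < 2 then 1
  else
    let evens := PySem.Int.floordiv step 2
    let odds := PySem.Int.floordiv (step - 1) 2
    (1 + 2 * evens) * (1 + 2 * evens - odds)

-- ===== PRECONDITION & SPEC =====
def Spec_formula62 (step : Int) (out : Int) : Prop := out = formula62_alt step
instance (step : Int) (out : Int) : Decidable (Spec_formula62 step out) := by unfold Spec_formula62; infer_instance

-- ===== CLAIM (what is proved, stated in full; the proofs are below) =====
def Claim_equal_formula62 : Prop := ∀ (step : Int), Dom_formula62 step → Spec_formula62 step (formula62 step)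

-- ===== LEMMAS AND PROOFS =====

-- loop invariant: the state after processing range(2, k+2), i.e. step = k+1
theorem pvLoop62 (k : Nat) :
    pvLoopA ((k : Int) + 1)
      = (1 + 2 * (((k + 1) / 2 : Nat) : Int),
         1 + 2 * (((k + 1) / 2 : Nat) : Int) - ((k / 2 : Nat) : Int)) := by
  induction k with
  | zero => simp [pvLoopA, PySem.List.pyRange_one_eq_nil]
  | succ n ih =>
    have hsplit : PySem.List.pyRange 2 ((n : Int) + 1 + 1 + 1) 1
        = PySem.List.pyRange 2 ((n : Int) + 1 + 1) 1 ++ [(n : Int) + 2] := by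
      have := PySem.List.pyRange_one_succ_right (a := 2) (b := (n : Int) + 2) (by omega)
      simpa [add_assoc, add_comm, add_left_comm] using this
    unfold pvLoopA at ih ⊢
    rw [show ((n + 1 : Nat) : Int) + 1 + 1 = (n : Int) + 1 + 1 + 1 by push_cast; ring, hsplit,
        List.foldl_append]
    rw [show ((n : Int) + 1 + 1) = (n : Int) + 1 + 1 from rfl] at ih
    rw [ih]
    have hmod : PySem.Int.mod ((n : Int) + 2) 2 = (((n + 2) % 2 : Nat) : Int) := by
      exact_mod_cast PySem.Int.mod_natCast (n + 2) 2
    rcases Nat.even_or_odd n with ⟨m, hm⟩ | ⟨m, hm⟩ <;> subst hm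
    · have h0 : (m + m + 2) % 2 = 0 := by omega
      have e1 : (m + m + 1) / 2 = m := by omega
      have e2 : (m + m + 1 + 1) / 2 = m + 1 := by omega
      have e3 : (m + m) / 2 = m := by omega
      have e4 : (m + m + 1) / 2 = m := by omega
      simp [hmod, h0, e1, e2, e3, e4, Prod.ext_iff]
      constructor <;> (try split_ifs) <;> push_cast <;> omega
    · have h1 : (2 * m + 1 + 2) % 2 = 1 := by omega
      have e1 : (2 * m + 1 + 1) / 2 = m + 1 := by omega
      have e2 : (2 * m + 1 + 1 + 1) / 2 = m + 1 := by omega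
      have e3 : (2 * m + 1) / 2 = m := by omega
      simp [hmod, h1, e1, e2, e3, Prod.ext_iff]
      omega

-- ===== VERDICT (by name: the statement is the Claim_ definition above) =====
theorem formula62_spec : Claim_equal_formula62 := by
  intro step _
  unfold Spec_formula62
  by_cases h : 1 ≤ step
  · obtain ⟨k, rfl⟩ : ∃ k : Nat, step = (k : Int) + 1 := ⟨(step - 1).toNat, by omega⟩
    unfold formula62
    rw [pvLoop62]
    unfold formula62_alt
    by_cases hk : (k : Int) + 1 < 2
    · have : k = 0 := by omega
      subst this; simp
    · have he : PySem.Int.floordiv ((k : Int) + 1) 2 = (((k + 1) / 2 : Nat) : Int) := by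
        exact_mod_cast PySem.Int.floordiv_natCast (k + 1) 2
      have ho : PySem.Int.floordiv ((k : Int) + 1 - 1) 2 = ((k / 2 : Nat) : Int) := by
        have h' : (k : Int) + 1 - 1 = (k : Int) := by ring
        rw [h']; exact_mod_cast PySem.Int.floordiv_natCast k 2
      rw [if_neg hk, he, ho]
  · unfold formula62 formula62_alt pvLoopA
    rw [PySem.List.pyRange_one_eq_nil (by omega), if_pos (by omega)]
    simp
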